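-- pv_equiv track=rewrite | github.com/Himanshu-soni01/GFG_Solution | Minimum_days_11_Feb.py | getMinimumDays
-- ===== SOURCE A (Python) =====
-- def getMinimumDays(N,S, P):
--     t = 0
--     S = list(S)
--     for i in range(N - 1):
--         if(S[i]==S[i+1]) : t+=1
--
--     if t==0 :
--         return 0
--
--     for i in range(N):
--
--         inn=P[i]
--
--         if inn-1>=0 and S[inn-1]==S[inn]: t-=1
--         if inn+1<N and S[inn]==S[inn+1]:t-=1
--         S[inn]='?'
--         if(t==0):
--             return i+1
-- ===== SOURCE B (Python) =====
-- def getMinimumDays(N, S, P):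
--     # Track removed positions in a set and recount the surviving equal
--     # adjacent pairs each day, instead of mutating S and maintaining the
--     # count incrementally.
--     def alive(removed):
--         c = 0
--         for j in range(N - 1):
--             if j not in removed and j + 1 not in removed and S[j] == S[j + 1]:
--                 c += 1
--         return c
--
--     removed = set()
--     if alive(removed) == 0:
--         return 0
--     for i in range(N):
--         removed.add(P[i])
--         if alive(removed) == 0:
--             return i + 1
-- ===== Notes on version B (the rewrite author's own statement) =====
-- stated objective: alternative
-- what changed: B keeps a set of removed positions and recounts the surviving equal adjacent pairs from scratch each day, instead of A's in-place '?' mutation of S with incremental decrement bookkeeping.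
-- outside the precondition, e.g. on getMinimumDays(2, 'aa', [-1, 0]): A returns 1, B returns 2; on getMinimumDays(4, 'a?bb', [0, 1, 2, 3]): A returns 2, B returns 3
import Mathlib
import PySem

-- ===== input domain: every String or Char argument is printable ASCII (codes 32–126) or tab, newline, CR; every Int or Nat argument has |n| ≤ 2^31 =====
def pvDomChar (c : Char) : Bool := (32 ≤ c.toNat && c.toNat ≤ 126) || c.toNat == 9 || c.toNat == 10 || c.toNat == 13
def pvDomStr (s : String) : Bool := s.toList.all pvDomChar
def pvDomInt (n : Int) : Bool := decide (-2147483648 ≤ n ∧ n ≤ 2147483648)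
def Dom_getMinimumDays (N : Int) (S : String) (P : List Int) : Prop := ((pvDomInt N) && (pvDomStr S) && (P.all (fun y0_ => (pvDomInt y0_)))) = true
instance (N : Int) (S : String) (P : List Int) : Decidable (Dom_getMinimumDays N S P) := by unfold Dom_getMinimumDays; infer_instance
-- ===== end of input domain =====

-- B replaces A's in-place '?' mutation + incremental pair-count bookkeeping with a removed-position
-- set and a full recount of the surviving equal adjacent pairs each day (alternative, not faster).

-- ===== PORT A =====
-- 'for i in range(N-1): if S[i]==S[i+1]: t += 1'
def pvACount (S : List Char) : List Int → Int → Option Int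
  | [], t => some t
  | i :: is, t =>
    match PySem.List.pyGet? S i, PySem.List.pyGet? S (i + 1) with
    | some a, some b => pvACount S is (if a = b then t + 1 else t)
    | _, _ => none

-- one day of A's second loop: the two guarded decrements, then S[inn] = '?'
def pvAStep (N : Int) (S : List Char) (t : Int) (inn : Int) : Option (List Char × Int) :=
  (if 0 ≤ inn - 1 then
      (PySem.List.pyGet? S (inn - 1)).bind fun a =>
        (PySem.List.pyGet? S inn).bind fun b =>
          some (if a = b then t - 1 else t)
    else some t).bind fun t1 =>
  (if inn + 1 < N then
      (PySem.List.pyGet? S inn).bind fun a =>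
        (PySem.List.pyGet? S (inn + 1)).bind fun b =>
          some (if a = b then t1 - 1 else t1)
    else some t1).bind fun t2 =>
  (PySem.List.pySet? S inn '?').bind fun S' =>
  some (S', t2)

-- 'for i in range(N): …' (falls through: Python returns None)
def pvALoop (N : Int) (P : List Int) : List Int → List Char → Int → Option Int
  | [], _, _ => none
  | i :: is, S, t =>
    match PySem.List.pyGet? P i with
    | none => none
    | some inn =>
      match pvAStep N S t inn with
      | none => none
      | some (S', t') => if t' = 0 then some (i + 1) else pvALoop N P is S' t'

def getMinimumDays (N : Int) (S : String) (P : List Int) : Option Int :=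
  match pvACount S.toList (PySem.List.pyRange 0 (N - 1) 1) 0 with
  | none => none
  | some t => if t = 0 then some 0 else pvALoop N P (PySem.List.pyRange 0 N 1) S.toList t

-- ===== PORT B =====
-- B's helper 'alive(removed)': count j in range(N-1) with j, j+1 unremoved and S[j]==S[j+1]
def pvAliveGo (S : List Char) (removed : PySem.Set Int) : List Int → Int → Option Int
  | [], c => some c
  | j :: js, c =>
    if !(PySem.Set.contains removed j) && !(PySem.Set.contains removed (j + 1)) then
      match PySem.List.pyGet? S j, PySem.List.pyGet? S (j + 1) with
      | some a, some b => pvAliveGo S removed js (if a = b then c + 1 else c)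
      | _, _ => none
    else pvAliveGo S removed js c

def pvAlive (N : Int) (S : List Char) (removed : PySem.Set Int) : Option Int :=
  pvAliveGo S removed (PySem.List.pyRange 0 (N - 1) 1) 0

-- 'for i in range(N): removed.add(P[i]); if alive(removed) == 0: return i+1'
def pvAltLoop (N : Int) (S : List Char) (P : List Int) : List Int → PySem.Set Int → Option Int
  | [], _ => none
  | i :: is, removed =>
    match PySem.List.pyGet? P i with
    | none => none
    | some inn =>
      let removed' := PySem.Set.add removed inn
      match pvAlive N S removed' with
      | none => none
      | some c => if c = 0 then some (i + 1) else pvAltLoop N S P is removed'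

def getMinimumDays_alt (N : Int) (S : String) (P : List Int) : Option Int :=
  match pvAlive N S.toList PySem.Set.empty with
  | none => none
  | some c => if c = 0 then some 0 else pvAltLoop N S.toList P (PySem.List.pyRange 0 N 1) PySem.Set.empty

-- ===== PRECONDITION & SPEC =====
-- Pre_ restricts to the problem's natural domain: when the removal loop can run (N ≥ 2 and S has an
-- equal adjacent pair among its first N characters), S must be at least N long and the first N entries
-- of P a permutation of 0..N-1 (otherwise A raises IndexError or wraps negative indices), and S's first
-- N characters must not contain '?', A's in-band removal sentinel, which collides with real data.
def Pre_getMinimumDays (N : Int) (S : String) (P : List Int) : Prop :=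
  2 ≤ N →
    N ≤ (S.toList.length : Int) ∧
    ((∃ j ∈ List.range (N.toNat - 1), S.toList[j]? = S.toList[j + 1]?) →
      '?' ∉ S.toList.take N.toNat ∧
      N ≤ (P.length : Int) ∧
      (P.take N.toNat).Nodup ∧
      ∀ x ∈ P.take N.toNat, 0 ≤ x ∧ x < N)
instance (N : Int) (S : String) (P : List Int) : Decidable (Pre_getMinimumDays N S P) := by
  unfold Pre_getMinimumDays; infer_instance

def pvWitness_getMinimumDays : Int × String × List Int := (3, "aab", [2, 0, 1])

def Spec_getMinimumDays (N : Int) (S : String) (P : List Int) (out : Option Int) : Prop := out = getMinimumDays_alt N S P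
instance (N : Int) (S : String) (P : List Int) (out : Option Int) : Decidable (Spec_getMinimumDays N S P out) := by unfold Spec_getMinimumDays; infer_instance

-- ===== CLAIM (what is proved, stated in full; the proofs are below) =====
def Claim_equal_getMinimumDays : Prop := ∀ (N : Int) (S : String) (P : List Int), Dom_getMinimumDays N S P → Pre_getMinimumDays N S P → Spec_getMinimumDays N S P (getMinimumDays N S P)

-- ===== LEMMAS AND PROOFS =====

-- the number of "alive" equal adjacent pairs, given the removed positions R
def pvCnt (S : List Char) (R : List Int) : List Int → Int
  | [] => 0
  | j :: L =>
    (if j ∉ R ∧ (j + 1) ∉ R ∧ S.getD j.toNat '?' = S.getD (j + 1).toNat '?' then 1 else 0)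
      + pvCnt S R L

theorem pvAliveGo_eq (S : List Char) (R : PySem.Set Int) (L : List Int) (c : Int)
    (h : ∀ j ∈ L, 0 ≤ j ∧ j + 1 < (S.length : Int)) :
    pvAliveGo S R L c = some (c + pvCnt S R L) := by
  induction L generalizing c with
  | nil => simp [pvAliveGo, pvCnt]
  | cons j js ih =>
    obtain ⟨hj0, hjlt⟩ := h j (by simp)
    have hrest : ∀ x ∈ js, 0 ≤ x ∧ x + 1 < (S.length : Int) := fun x hx => h x (by simp [hx])
    have hjn : j.toNat < S.length := by omega
    have hj1n : (j + 1).toNat < S.length := by omega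
    have e1 : PySem.List.pyGet? S j = some S[j.toNat] :=
      PySem.List.pyGet?_eq_some_getElem S hj0 (by omega)
    have e2 : PySem.List.pyGet? S (j + 1) = some S[(j + 1).toNat] :=
      PySem.List.pyGet?_eq_some_getElem S (by omega) (by omega)
    by_cases hj : j ∈ R
    · have hcj : PySem.Set.contains R j = true := (PySem.Set.contains_iff R j).mpr hj
      have hstep : pvAliveGo S R (j :: js) c = pvAliveGo S R js c := by
        simp [pvAliveGo, hj]
      rw [hstep, ih _ hrest]
      simp [pvCnt, hj]
    · have hcj : PySem.Set.contains R j = false :=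
        Bool.eq_false_iff.mpr (fun hc => hj ((PySem.Set.contains_iff R j).mp hc))
      by_cases hj1 : (j + 1) ∈ R
      · have hcj1 : PySem.Set.contains R (j + 1) = true := (PySem.Set.contains_iff R (j + 1)).mpr hj1
        have hstep : pvAliveGo S R (j :: js) c = pvAliveGo S R js c := by
          simp [pvAliveGo, hj, hj1]
        rw [hstep, ih _ hrest]
        simp [pvCnt, hj1]
      · have hcj1 : PySem.Set.contains R (j + 1) = false :=
          Bool.eq_false_iff.mpr (fun hc => hj1 ((PySem.Set.contains_iff R (j + 1)).mp hc))
        have hstep : pvAliveGo S R (j :: js) c =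
            pvAliveGo S R js (if S[j.toNat] = S[(j + 1).toNat] then c + 1 else c) := by
          simp [pvAliveGo, hj, hj1, e1, e2]
        rw [hstep, ih _ hrest]
        have hc2 : pvCnt S R (j :: js) = (if S[j.toNat] = S[(j + 1).toNat] then 1 else 0) + pvCnt S R js := by
          by_cases heq : S[j.toNat] = S[(j + 1).toNat] <;>
            simp [pvCnt, hj, hj1, heq,
              List.getElem?_eq_getElem hjn, List.getElem?_eq_getElem hj1n]
        rw [hc2]
        by_cases heq : S[j.toNat] = S[(j + 1).toNat] <;> simp [heq] <;> omega

theorem pvACount_eq (S : List Char) (L : List Int) (t : Int)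
    (h : ∀ j ∈ L, 0 ≤ j ∧ j + 1 < (S.length : Int)) :
    pvACount S L t = some (t + pvCnt S [] L) := by
  induction L generalizing t with
  | nil => simp [pvACount, pvCnt]
  | cons j js ih =>
    obtain ⟨hj0, hjlt⟩ := h j (by simp)
    have hrest : ∀ x ∈ js, 0 ≤ x ∧ x + 1 < (S.length : Int) := fun x hx => h x (by simp [hx])
    have hjn : j.toNat < S.length := by omega
    have hj1n : (j + 1).toNat < S.length := by omega
    have e1 : PySem.List.pyGet? S j = some S[j.toNat] :=
      PySem.List.pyGet?_eq_some_getElem S hj0 (by omega)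
    have e2 : PySem.List.pyGet? S (j + 1) = some S[(j + 1).toNat] :=
      PySem.List.pyGet?_eq_some_getElem S (by omega) (by omega)
    have hstep : pvACount S (j :: js) t =
        pvACount S js (if S[j.toNat] = S[(j + 1).toNat] then t + 1 else t) := by
      simp [pvACount, e1, e2]
    rw [hstep, ih _ hrest]
    have hc2 : pvCnt S [] (j :: js) = (if S[j.toNat] = S[(j + 1).toNat] then 1 else 0) + pvCnt S [] js := by
      by_cases heq : S[j.toNat] = S[(j + 1).toNat] <;>
        simp [pvCnt, heq,
          List.getElem?_eq_getElem hjn, List.getElem?_eq_getElem hj1n]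
    rw [hc2]
    by_cases heq : S[j.toNat] = S[(j + 1).toNat] <;> simp [heq] <;> omega

theorem pvCnt_snoc (S : List Char) (R : List Int) (inn : Int) (L : List Int) (hnd : L.Nodup) :
    pvCnt S (R ++ [inn]) L =
      pvCnt S R L
      - (if (inn - 1) ∈ L ∧ (inn - 1) ∉ R ∧ inn ∉ R ∧
            S.getD (inn - 1).toNat '?' = S.getD inn.toNat '?' then 1 else 0)
      - (if inn ∈ L ∧ inn ∉ R ∧ (inn + 1) ∉ R ∧
            S.getD inn.toNat '?' = S.getD (inn + 1).toNat '?' then 1 else 0) := by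
  induction L with
  | nil => simp [pvCnt]
  | cons a L ih =>
    obtain ⟨haL, hndL⟩ := List.nodup_cons.mp hnd
    have ihL := ih hndL
    by_cases ha1 : a = inn - 1
    · subst ha1
      have h1 : inn - 1 + 1 = inn := by omega
      have hne : ¬ (inn = inn - 1) := by omega
      simp only [pvCnt, h1, ihL, List.mem_cons]
      have hz : ¬ ((inn - 1) ∉ R ++ [inn] ∧ inn ∉ R ++ [inn] ∧
          S.getD (inn - 1).toNat '?' = S.getD inn.toNat '?') := by
        intro hcon; exact hcon.2.1 (by simp)
      rw [if_neg hz]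
      by_cases hC1 : (inn - 1) ∉ R ∧ inn ∉ R ∧ S.getD (inn - 1).toNat '?' = S.getD inn.toNat '?' <;>
        by_cases hIL : inn ∈ L <;>
          by_cases hC2 : inn ∉ R ∧ (inn + 1) ∉ R ∧
            S.getD inn.toNat '?' = S.getD (inn + 1).toNat '?' <;>
            simp [hC1, hIL, hC2, haL, hne] <;> omega
    · by_cases ha2 : a = inn
      · subst ha2
        have hne : ¬ (a - 1 = a) := by omega
        simp only [pvCnt, ihL, List.mem_cons]
        have hz : ¬ (a ∉ R ++ [a] ∧ (a + 1) ∉ R ++ [a] ∧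
            S.getD a.toNat '?' = S.getD (a + 1).toNat '?') := by
          intro hcon; exact hcon.1 (by simp)
        rw [if_neg hz]
        by_cases hC1 : (a - 1) ∉ R ∧ a ∉ R ∧ S.getD (a - 1).toNat '?' = S.getD a.toNat '?' <;>
          by_cases hIL : (a - 1) ∈ L <;>
            by_cases hC2 : a ∉ R ∧ (a + 1) ∉ R ∧
              S.getD a.toNat '?' = S.getD (a + 1).toNat '?' <;>
              simp [hC1, hIL, hC2, haL, hne] <;> omega
      · have hne1 : ¬ (inn - 1 = a) := fun h => ha1 h.symm
        have hne2 : ¬ (inn = a) := fun h => ha2 h.symm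
        have hane : ¬ (a = inn) := ha2
        have ha1ne : ¬ (a + 1 = inn) := by omega
        simp only [pvCnt, ihL, List.mem_cons, List.mem_append, List.mem_singleton, hane,
          ha1ne, hne1, hne2, or_false, false_or, eq_self_iff_true]
        by_cases hpa : a ∉ R ∧ (a + 1) ∉ R ∧ S.getD a.toNat '?' = S.getD (a + 1).toNat '?' <;>
          · simp [hpa]
            ring

theorem pvAStep_eq (N : Int) (S0 SA : List Char) (R : List Int) (t inn : Int)
    (hlen : SA.length = S0.length)
    (hn : N ≤ (S0.length : Int))
    (hSA : ∀ m : Nat, SA.getD m '?' = if (m : Int) ∈ R then '?' else S0.getD m '?')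
    (hq : ∀ m : Nat, (m : Int) < N → S0.getD m '?' ≠ '?')
    (h0 : 0 ≤ inn) (hN : inn < N) (hnotin : inn ∉ R) :
    pvAStep N SA t inn = some (SA.set inn.toNat '?',
      t - (if 0 ≤ inn - 1 ∧ (inn - 1) ∉ R ∧ S0.getD (inn - 1).toNat '?' = S0.getD inn.toNat '?' then 1 else 0)
        - (if inn + 1 < N ∧ (inn + 1) ∉ R ∧ S0.getD inn.toNat '?' = S0.getD (inn + 1).toNat '?' then 1 else 0)) := by
  have hsl : (SA.length : Int) = (S0.length : Int) := by exact_mod_cast hlen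
  have hinn : inn.toNat < SA.length := by omega
  have hicast : ((inn.toNat : Nat) : Int) = inn := Int.toNat_of_nonneg h0
  have hbm : SA.getD inn.toNat '?' = S0.getD inn.toNat '?' := by
    rw [hSA]; rw [if_neg]; rw [hicast]; exact hnotin
  have hq0 : S0.getD inn.toNat '?' ≠ '?' := hq inn.toNat (by rw [hicast]; exact hN)
  have eb : PySem.List.pyGet? SA inn = some (SA.getD inn.toNat '?') := by
    rw [PySem.List.pyGet?_eq_some_getElem SA h0 (by omega)]
    rw [List.getD_eq_getElem SA '?' hinn]
  have eset : PySem.List.pySet? SA inn '?' = some (SA.set inn.toNat '?') := by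
    rw [show inn = ((inn.toNat : Nat) : Int) from hicast.symm]
    exact PySem.List.pySet?_natCast SA inn.toNat '?' hinn
  have ht1 : (if 0 ≤ inn - 1 then
        (PySem.List.pyGet? SA (inn - 1)).bind fun a =>
          (PySem.List.pyGet? SA inn).bind fun b =>
            some (if a = b then t - 1 else t)
      else some t) = some (t - (if 0 ≤ inn - 1 ∧ (inn - 1) ∉ R ∧
        S0.getD (inn - 1).toNat '?' = S0.getD inn.toNat '?' then 1 else 0)) := by
    by_cases hg1 : 0 ≤ inn - 1
    · have h1n : (inn - 1).toNat < SA.length := by omega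
      have h1cast : (((inn - 1).toNat : Nat) : Int) = inn - 1 := Int.toNat_of_nonneg hg1
      have ea : PySem.List.pyGet? SA (inn - 1) = some (SA.getD (inn - 1).toNat '?') := by
        rw [PySem.List.pyGet?_eq_some_getElem SA hg1 (by omega)]
        rw [List.getD_eq_getElem SA '?' h1n]
      rw [if_pos hg1, ea, eb]
      simp only [Option.bind_some]
      by_cases hr1 : (inn - 1) ∈ R
      · have ha : SA.getD (inn - 1).toNat '?' = '?' := by
          rw [hSA]; rw [if_pos]; rw [h1cast]; exact hr1
        have hne : ¬ (SA.getD (inn - 1).toNat '?' = SA.getD inn.toNat '?') := by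
          rw [ha, hbm]; exact fun h => hq0 h.symm
        rw [if_neg hne, if_neg (fun hc => hc.2.1 hr1)]
        norm_num
      · have ha : SA.getD (inn - 1).toNat '?' = S0.getD (inn - 1).toNat '?' := by
          rw [hSA]; rw [if_neg]; rw [h1cast]; exact hr1
        rw [ha, hbm]
        by_cases heq : S0.getD (inn - 1).toNat '?' = S0.getD inn.toNat '?'
        · rw [if_pos heq, if_pos ⟨hg1, hr1, heq⟩]
        · rw [if_neg heq, if_neg (fun hc => heq hc.2.2)]
          norm_num
    · rw [if_neg hg1, if_neg (fun hc => hg1 hc.1)]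
      norm_num
  have ht2 : ∀ t1 : Int, (if inn + 1 < N then
        (PySem.List.pyGet? SA inn).bind fun a =>
          (PySem.List.pyGet? SA (inn + 1)).bind fun b =>
            some (if a = b then t1 - 1 else t1)
      else some t1) = some (t1 - (if inn + 1 < N ∧ (inn + 1) ∉ R ∧
        S0.getD inn.toNat '?' = S0.getD (inn + 1).toNat '?' then 1 else 0)) := by
    intro t1
    by_cases hg2 : inn + 1 < N
    · have h2n : (inn + 1).toNat < SA.length := by omega
      have h2cast : (((inn + 1).toNat : Nat) : Int) = inn + 1 := Int.toNat_of_nonneg (by omega)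
      have ea : PySem.List.pyGet? SA (inn + 1) = some (SA.getD (inn + 1).toNat '?') := by
        rw [PySem.List.pyGet?_eq_some_getElem SA (by omega) (by omega)]
        rw [List.getD_eq_getElem SA '?' h2n]
      rw [if_pos hg2, ea, eb]
      simp only [Option.bind_some]
      by_cases hr2 : (inn + 1) ∈ R
      · have ha : SA.getD (inn + 1).toNat '?' = '?' := by
          rw [hSA]; rw [if_pos]; rw [h2cast]; exact hr2
        have hne : ¬ (SA.getD inn.toNat '?' = SA.getD (inn + 1).toNat '?') := by
          rw [ha, hbm]; exact hq0
        rw [if_neg hne, if_neg (fun hc => hc.2.1 hr2)]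
        norm_num
      · have ha : SA.getD (inn + 1).toNat '?' = S0.getD (inn + 1).toNat '?' := by
          rw [hSA]; rw [if_neg]; rw [h2cast]; exact hr2
        rw [ha, hbm]
        by_cases heq : S0.getD inn.toNat '?' = S0.getD (inn + 1).toNat '?'
        · rw [if_pos heq, if_pos ⟨hg2, hr2, heq⟩]
        · rw [if_neg heq, if_neg (fun hc => heq hc.2.2)]
          norm_num
    · rw [if_neg hg2, if_neg (fun hc => hg2 hc.1)]
      norm_num
  rw [pvAStep, ht1]
  simp only [Option.bind_some, ht2, eset]

theorem pvLockstep (N : Int) (S0 : List Char) (P : List Int)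
    (hn : N ≤ (S0.length : Int))
    (hP : N ≤ (P.length : Int))
    (hnd : (P.take N.toNat).Nodup)
    (hrange : ∀ x ∈ P.take N.toNat, 0 ≤ x ∧ x < N)
    (hq : ∀ m : Nat, (m : Int) < N → S0.getD m '?' ≠ '?') :
    ∀ (j k : Nat) (SA : List Char), k + j = N.toNat →
      SA.length = S0.length →
      (∀ m : Nat, SA.getD m '?' = if (m : Int) ∈ P.take k then '?' else S0.getD m '?') →
      pvALoop N P (PySem.List.pyRange k N 1) SA (pvCnt S0 (P.take k) (PySem.List.pyRange 0 (N - 1) 1)) =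
      pvAltLoop N S0 P (PySem.List.pyRange k N 1) (PySem.Set.ofList (P.take k)) := by
  have hPl : N.toNat ≤ P.length := by omega
  intro j
  induction j with
  | zero =>
    intro k SA hk _ _
    have hnil : PySem.List.pyRange (k : Int) N 1 = [] :=
      PySem.List.pyRange_one_eq_nil (by omega)
    rw [hnil]
    rfl
  | succ j ih =>
    intro k SA hk hlen hSA
    have hkN : (k : Int) < N := by omega
    have hkP : k < P.length := by omega
    rw [PySem.List.pyRange_one_cons hkN]
    have eP : PySem.List.pyGet? P (k : Int) = some P[k] :=
      PySem.List.pyGet?_eq_some_getElem P (by omega) (by omega)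
    set inn := P[k] with hinn_def
    have hinnmem : inn ∈ P.take N.toNat := by
      have h : (P.take N.toNat)[k]'(by
        simp only [List.length_take]; omega) ∈ P.take N.toNat := List.getElem_mem _
      simpa [List.getElem_take] using h
    obtain ⟨hinn0, hinnN⟩ := hrange inn hinnmem
    have htake_succ : P.take (k + 1) = P.take k ++ [inn] := by
      rw [hinn_def, List.take_add_one, List.getElem?_eq_getElem hkP]
      rfl
    have hndk1 : (P.take (k + 1)).Nodup := by
      have hsub : (P.take (k + 1)).Sublist (P.take N.toNat) := by
        rw [show P.take (k + 1) = (P.take N.toNat).take (k + 1) from by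
          rw [List.take_take]; congr 1; omega]
        exact List.take_sublist _ _
      exact hnd.sublist hsub
    have hndk : (P.take k).Nodup := by
      have hsub : (P.take k).Sublist (P.take (k + 1)) := by
        rw [show P.take k = (P.take (k + 1)).take k from by
          rw [List.take_take]; congr 1; omega]
        exact List.take_sublist _ _
      exact hndk1.sublist hsub
    have hnotin : inn ∉ P.take k := by
      intro hm
      have h1 : (P.take k ++ [inn]).Nodup := by rw [← htake_succ]; exact hndk1
      exact (List.disjoint_of_nodup_append h1) hm (by simp)
    have hrng_ok : ∀ x ∈ PySem.List.pyRange 0 (N - 1) 1, 0 ≤ x ∧ x + 1 < (S0.length : Int) := by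
      intro x hx
      rw [PySem.List.mem_pyRange_one] at hx
      omega
    have hstep := pvAStep_eq N S0 SA (P.take k)
      (pvCnt S0 (P.take k) (PySem.List.pyRange 0 (N - 1) 1)) inn hlen hn hSA hq hinn0 hinnN hnotin
    have hcnt : pvCnt S0 (P.take k) (PySem.List.pyRange 0 (N - 1) 1)
        - (if 0 ≤ inn - 1 ∧ (inn - 1) ∉ P.take k ∧
            S0.getD (inn - 1).toNat '?' = S0.getD inn.toNat '?' then 1 else 0)
        - (if inn + 1 < N ∧ (inn + 1) ∉ P.take k ∧
            S0.getD inn.toNat '?' = S0.getD (inn + 1).toNat '?' then 1 else 0)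
        = pvCnt S0 (P.take (k + 1)) (PySem.List.pyRange 0 (N - 1) 1) := by
      rw [htake_succ, pvCnt_snoc S0 (P.take k) inn _ (PySem.List.nodup_pyRange_one 0 (N - 1))]
      congr 1
      · congr 1
        apply if_congr _ rfl rfl
        rw [PySem.List.mem_pyRange_one]
        constructor
        · rintro ⟨hg, hr, heq⟩; exact ⟨⟨hg, by omega⟩, hr, hnotin, heq⟩
        · rintro ⟨⟨hg, _⟩, hr, _, heq⟩; exact ⟨hg, hr, heq⟩
      · apply if_congr _ rfl rfl
        rw [PySem.List.mem_pyRange_one]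
        constructor
        · rintro ⟨hg, hr, heq⟩; exact ⟨⟨hinn0, by omega⟩, hnotin, hr, heq⟩
        · rintro ⟨⟨_, hlt⟩, _, hr, heq⟩; exact ⟨by omega, hr, heq⟩
    have hof : PySem.Set.ofList (P.take k) = P.take k := PySem.Set.ofList_eq_self_of_nodup (P.take k) hndk
    have hof1 : PySem.Set.ofList (P.take (k + 1)) = P.take (k + 1) :=
      PySem.Set.ofList_eq_self_of_nodup (P.take (k + 1)) hndk1
    have hadd : PySem.Set.add (PySem.Set.ofList (P.take k)) inn = P.take (k + 1) := by
      rw [hof, PySem.Set.add_of_not_mem hnotin, htake_succ]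
    have halive : pvAlive N S0 (PySem.Set.add (PySem.Set.ofList (P.take k)) inn) =
        some (pvCnt S0 (P.take (k + 1)) (PySem.List.pyRange 0 (N - 1) 1)) := by
      rw [hadd, pvAlive, pvAliveGo_eq S0 _ _ 0 hrng_ok, zero_add]
    rw [pvALoop, pvAltLoop, eP]
    simp only [hstep, halive]

    rw [hcnt]
    by_cases hz : pvCnt S0 (P.take (k + 1)) (PySem.List.pyRange 0 (N - 1) 1) = 0
    · simp [hz]
    · simp only [if_neg hz]
      have hcast : (k : Int) + 1 = ((k + 1 : Nat) : Int) := by push_cast; ring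
      rw [hcast]
      conv_rhs => rw [hadd, ← hof1]
      apply ih (k + 1) (SA.set inn.toNat '?') (by omega) (by simp [hlen])
      intro m
      have hinnlen : inn.toNat < SA.length := by
        have hsl : (SA.length : Int) = (S0.length : Int) := by exact_mod_cast hlen
        omega
      by_cases hm : m = inn.toNat
      · subst hm
        have : (SA.set inn.toNat '?').getD inn.toNat '?' = '?' := by
          rw [List.getD_eq_getElem _ '?' (by simpa using hinnlen)]
          simp
        rw [this, if_pos]
        rw [htake_succ]
        simp [Int.toNat_of_nonneg hinn0]
      · have hset : (SA.set inn.toNat '?').getD m '?' = SA.getD m '?' := by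
          simp [List.getD_eq_getElem?_getD, List.getElem?_set_ne (fun h => hm h.symm)]
        rw [hset, hSA m]
        have hmem : ((m : Int) ∈ P.take (k + 1)) ↔ ((m : Int) ∈ P.take k) := by
          rw [htake_succ]
          simp only [List.mem_append, List.mem_singleton]
          constructor
          · rintro (h | h)
            · exact h
            · exfalso; apply hm; omega
          · exact fun h => Or.inl h
        rw [if_congr hmem rfl rfl]

theorem pvCnt_ne_zero (S : List Char) (R : List Int) :
    ∀ L : List Int, pvCnt S R L ≠ 0 →
      ∃ j ∈ L, j ∉ R ∧ (j + 1) ∉ R ∧ S.getD j.toNat '?' = S.getD (j + 1).toNat '?'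
  | [] => by simp [pvCnt]
  | j :: L => by
    intro h
    by_cases hp : j ∉ R ∧ (j + 1) ∉ R ∧ S.getD j.toNat '?' = S.getD (j + 1).toNat '?'
    · exact ⟨j, by simp, hp⟩
    · have h' : pvCnt S R L ≠ 0 := by
        intro h0; apply h; simp only [pvCnt, if_neg hp, h0, add_zero]
      obtain ⟨x, hx, hpx⟩ := pvCnt_ne_zero S R L h'
      exact ⟨x, by simp [hx], hpx⟩

-- ===== VERDICT (by name: the statement is the Claim_ definition above) =====
theorem getMinimumDays_spec : Claim_equal_getMinimumDays := by
  intro N S P _ hpre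
  unfold Spec_getMinimumDays
  by_cases hN : 2 ≤ N
  · obtain ⟨hlen, hrest⟩ := hpre hN
    have hrng_ok : ∀ x ∈ PySem.List.pyRange 0 (N - 1) 1, 0 ≤ x ∧ x + 1 < (S.toList.length : Int) := by
      intro x hx
      rw [PySem.List.mem_pyRange_one] at hx
      omega
    have hA : pvACount S.toList (PySem.List.pyRange 0 (N - 1) 1) 0 =
        some (pvCnt S.toList [] (PySem.List.pyRange 0 (N - 1) 1)) := by
      rw [pvACount_eq S.toList _ 0 hrng_ok, zero_add]
    have hB : pvAlive N S.toList PySem.Set.empty =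
        some (pvCnt S.toList [] (PySem.List.pyRange 0 (N - 1) 1)) := by
      rw [pvAlive, pvAliveGo_eq S.toList PySem.Set.empty _ 0 hrng_ok, zero_add]
      rfl
    rw [getMinimumDays, getMinimumDays_alt]
    simp only [hA, hB]
    by_cases hz : pvCnt S.toList [] (PySem.List.pyRange 0 (N - 1) 1) = 0
    · simp [hz]
    · simp only [if_neg hz]
      obtain ⟨j, hjmem, _, _, hjeq⟩ := pvCnt_ne_zero S.toList [] _ hz
      rw [PySem.List.mem_pyRange_one] at hjmem
      have hpair : ∃ m ∈ List.range (N.toNat - 1), S.toList[m]? = S.toList[m + 1]? := by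
        refine ⟨j.toNat, by rw [List.mem_range]; omega, ?_⟩
        have hmn : j.toNat < S.toList.length := by omega
        have hm1n : j.toNat + 1 < S.toList.length := by omega
        rw [List.getElem?_eq_getElem hmn, List.getElem?_eq_getElem hm1n]
        have h1 : (j + 1).toNat = j.toNat + 1 := by omega
        rw [h1] at hjeq
        rw [List.getD_eq_getElem S.toList '?' hmn, List.getD_eq_getElem S.toList '?' hm1n] at hjeq
        rw [hjeq]
      obtain ⟨hq', hPlen, hnd, hrange⟩ := hrest hpair
      have hq : ∀ m : Nat, (m : Int) < N → S.toList.getD m '?' ≠ '?' := by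
        intro m hm hbad
        apply hq'
        have hmn : m < S.toList.length := by omega
        rw [List.getD_eq_getElem S.toList '?' hmn] at hbad
        rw [← hbad]
        have hmN : m < N.toNat := by omega
        have : (S.toList.take N.toNat)[m]'(by rw [List.length_take]; omega) = S.toList[m] := List.getElem_take
        rw [← this]
        exact List.getElem_mem _
      have hmain := pvLockstep N S.toList P hlen hPlen hnd hrange hq N.toNat 0 S.toList
        (by omega) rfl (by intro m; simp)
      simpa using hmain
  · have h1 : PySem.List.pyRange 0 (N - 1) 1 = [] := PySem.List.pyRange_one_eq_nil (by omega)
    rw [getMinimumDays, getMinimumDays_alt, h1]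
    simp [pvACount, pvAlive, pvAliveGo, h1]
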